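-- pv_equiv track=rewrite | github.com/mjw/adventofcode2021 | day3_2.py | scrubber
-- ===== SOURCE A (Python) =====
-- def scrubber(data, depth=0):
--     if len(data)==1:
--         return data[0]
--
--     ones = [s for s in data if s[depth]=="1"]
--     zeros = [s for s in data if s[depth]=="0"]
--
--     if len(ones)==len(zeros):
--         return scrubber(zeros, depth+1)
--     elif len(ones)>len(zeros):
--         return scrubber(zeros, depth+1)
--     else:
--         return scrubber(ones, depth+1)
-- ===== SOURCE B (Python) =====
-- def scrubber(data, depth=0):
--     while len(data) != 1:
--         zeros, ones = [], []
--         for s in data: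
--             if s[depth] == "0":
--                 zeros.append(s)
--             elif s[depth] == "1":
--                 ones.append(s)
--         data = ones if len(ones) < len(zeros) else zeros
--         depth += 1
--     return data[0]
-- ===== Notes on version B (the rewrite author's own statement) =====
-- stated objective: alternative
-- what changed: A's recursion with two list comprehensions and a three-way majority branch is replaced by an iterative while-loop that partitions the remaining strings into zeros/ones in a single pass and picks the kept side with one 'len(ones) < len(zeros)' comparison.
import Mathlib
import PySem

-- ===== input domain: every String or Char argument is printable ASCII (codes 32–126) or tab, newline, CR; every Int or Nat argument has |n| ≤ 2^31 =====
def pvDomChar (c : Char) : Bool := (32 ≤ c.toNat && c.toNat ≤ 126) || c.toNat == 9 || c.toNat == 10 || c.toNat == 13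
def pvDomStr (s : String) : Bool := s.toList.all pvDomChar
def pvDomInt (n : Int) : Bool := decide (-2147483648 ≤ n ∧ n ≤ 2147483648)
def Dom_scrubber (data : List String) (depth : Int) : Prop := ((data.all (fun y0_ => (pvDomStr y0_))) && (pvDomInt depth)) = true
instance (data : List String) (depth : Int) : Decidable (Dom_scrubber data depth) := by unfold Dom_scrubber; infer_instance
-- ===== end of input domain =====

-- B replaces A's recursion (two comprehensions, three-way branch) by an iterative while-loop that
-- partitions the list in one pass and keeps the side chosen by a single comparison; same values.

-- termination helper for port A, cited by its decreasing_by
theorem pv_filter_disjoint_le {α : Type} (l : List α) (p q : α → Bool)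
    (h : ∀ x, ¬(p x = true ∧ q x = true)) :
    (l.filter p).length + (l.filter q).length ≤ l.length := by
  induction l with
  | nil => simp
  | cons a t ih =>
    by_cases hp : p a = true <;> by_cases hq : q a = true
    · exact absurd ⟨hp, hq⟩ (h a)
    all_goals simp only [List.filter, hp, hq, List.length_cons]; omega

theorem pv_one_zero_disjoint (depth : Int) :
    ∀ s : String, ¬((PySem.Str.pyGet? s depth == some '1') = true ∧
                    (PySem.Str.pyGet? s depth == some '0') = true) := by
  intro s ⟨h1, h0⟩
  simp only [beq_iff_eq] at h1 h0
  rw [h1] at h0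
  simp at h0

-- ===== PORT A =====
def scrubber (data : List String) (depth : Int) : String :=
  match data with
  | [] => ""            -- Python recurses forever here (RecursionError, no return); excluded by Pre_
  | [s] => s
  | a :: b :: rest =>
    let ones := (a :: b :: rest).filter (fun s => PySem.Str.pyGet? s depth == some '1')
    let zeros := (a :: b :: rest).filter (fun s => PySem.Str.pyGet? s depth == some '0')
    if ones.length = zeros.length then scrubber zeros (depth + 1)
    else if ones.length > zeros.length then scrubber zeros (depth + 1)
    else scrubber ones (depth + 1)
termination_by data.length
decreasing_by
  all_goals
    have h1 : ones.length = ((a :: b :: rest).filter (fun s => PySem.Str.pyGet? s depth == some '1')).length := rfl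
    have h0 : zeros.length = ((a :: b :: rest).filter (fun s => PySem.Str.pyGet? s depth == some '0')).length := rfl
    have := pv_filter_disjoint_le (a :: b :: rest)
      (fun s => PySem.Str.pyGet? s depth == some '1')
      (fun s => PySem.Str.pyGet? s depth == some '0')
      (pv_one_zero_disjoint depth)
    simp only [List.length_cons] at *
    omega

-- ===== PORT B =====
-- one pass over data, building (zeros, ones) in order, as Python B's for-loop of appends does
def pvSplit (depth : Int) : List String → List String × List String
  | [] => ([], [])
  | s :: t =>
    let zo := pvSplit depth t
    if PySem.Str.pyGet? s depth == some '0' then (s :: zo.1, zo.2)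
    else if PySem.Str.pyGet? s depth == some '1' then (zo.1, s :: zo.2)
    else zo

-- Python B's while-loop, made total with a fuel guard (fuel is never exhausted inside Pre_)
def pvLoop : Nat → List String → Int → String
  | 0, _, _ => ""
  | fuel + 1, data, depth =>
    if data.length == 1 then data.headD ""
    else
      let zo := pvSplit depth data
      pvLoop fuel (if zo.2.length < zo.1.length then zo.2 else zo.1) (depth + 1)

def scrubber_alt (data : List String) (depth : Int) : String :=
  pvLoop data.length data depth

-- ===== PRECONDITION & SPEC =====
-- survivors of i filtering steps: the strings agreeing with r on positions depth..depth+i-1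
def pvMatch (data : List String) (depth : Int) (r : String) (k : Nat) : List String :=
  data.filter (fun s => (List.range k).all
    (fun j => PySem.Str.pyGet? s (depth + (j : Int)) == PySem.Str.pyGet? r (depth + (j : Int))))

-- the bit A keeps at column d: '0' on a tie or a majority of ones, else '1'
def pvKeep (S : List String) (d : Int) : Char :=
  if S.countP (fun s => PySem.Str.pyGet? s d == some '0')
     ≤ S.countP (fun s => PySem.Str.pyGet? s d == some '1') then '0' else '1'

-- Pre_ excludes exactly the inputs on which Python A raises and returns nothing: RecursionError
-- (the kept side empties out, or data is empty) or IndexError (s[depth+i] out of range during the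
-- run); A returns iff some string r of data survives k < len(data) majority-filter steps alone.
def Pre_scrubber (data : List String) (depth : Int) : Prop :=
  data.length = 1 ∨
  ∃ r ∈ data, ∃ k < data.length,
    (∀ i < k,
      2 ≤ (pvMatch data depth r i).length ∧
      (∀ s ∈ pvMatch data depth r i, PySem.Raise.InRange s.toList.length (depth + (i : Int))) ∧
      PySem.Str.pyGet? r (depth + (i : Int)) = some (pvKeep (pvMatch data depth r i) (depth + (i : Int)))) ∧
    (pvMatch data depth r k).length = 1
instance (data : List String) (depth : Int) : Decidable (Pre_scrubber data depth) := by
  unfold Pre_scrubber; infer_instance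

def pvWitness_scrubber : List String × Int := (["10", "01", "11"], 0)

def Spec_scrubber (data : List String) (depth : Int) (out : String) : Prop := out = scrubber_alt data depth
instance (data : List String) (depth : Int) (out : String) : Decidable (Spec_scrubber data depth out) := by unfold Spec_scrubber; infer_instance

-- ===== CLAIM (what is proved, stated in full; the proofs are below) =====
def Claim_equal_scrubber : Prop := ∀ (data : List String) (depth : Int), Dom_scrubber data depth → Pre_scrubber data depth → Spec_scrubber data depth (scrubber data depth)

-- ===== LEMMAS AND PROOFS =====

theorem pvMatch_zero (data : List String) (depth : Int) (r : String) :
    pvMatch data depth r 0 = data := by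
  simp [pvMatch]

theorem pv_pred_succ (depth : Int) (r s : String) (i : Nat) :
    (List.range (i + 1)).all
      (fun j => PySem.Str.pyGet? s (depth + (j : Int)) == PySem.Str.pyGet? r (depth + (j : Int)))
    = ((PySem.Str.pyGet? s depth == PySem.Str.pyGet? r depth) &&
       (List.range i).all
         (fun j => PySem.Str.pyGet? s ((depth + 1) + (j : Int)) == PySem.Str.pyGet? r ((depth + 1) + (j : Int)))) := by
  have h : ∀ j : Nat, depth + ((j : Int) + 1) = (depth + 1) + (j : Int) := by
    intro j; ring
  simp [List.range_succ_eq_map, List.all_map, Function.comp_def, h]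

theorem pvMatch_shift (data : List String) (depth : Int) (r : String) (i : Nat) :
    pvMatch (data.filter (fun s => PySem.Str.pyGet? s depth == PySem.Str.pyGet? r depth)) (depth + 1) r i
      = pvMatch data depth r (i + 1) := by
  unfold pvMatch
  rw [List.filter_filter]
  apply List.filter_congr
  intro s _
  rw [pv_pred_succ, Bool.and_comm]

theorem pv_mem_match_one (data : List String) (depth : Int) (r : String) (hr : r ∈ data) :
    r ∈ data.filter (fun s => PySem.Str.pyGet? s depth == PySem.Str.pyGet? r depth) := by
  simp [List.mem_filter, hr]

-- A's one filtering step reaches pvMatch data depth r 1 when r carries the kept bit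
theorem pvSplit_eq (depth : Int) (l : List String) :
    pvSplit depth l
      = (l.filter (fun s => PySem.Str.pyGet? s depth == some '0'),
         l.filter (fun s => PySem.Str.pyGet? s depth == some '1')) := by
  induction l with
  | nil => simp [pvSplit]
  | cons s t ih =>
    by_cases h0 : PySem.List.pyGet? s.toList depth = some '0'
    · have h1 : ¬ PySem.List.pyGet? s.toList depth = some '1' := by simp [h0]
      simp [pvSplit, ih, h0]
    · by_cases h1 : PySem.List.pyGet? s.toList depth = some '1'
      · simp [pvSplit, ih, h1]
      · simp [pvSplit, ih, h0, h1]

-- the certificate conditions, bundled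
def pvCert (data : List String) (depth : Int) (r : String) (k : Nat) : Prop :=
  (∀ i < k,
    2 ≤ (pvMatch data depth r i).length ∧
    (∀ s ∈ pvMatch data depth r i, PySem.Raise.InRange s.toList.length (depth + (i : Int))) ∧
    PySem.Str.pyGet? r (depth + (i : Int)) = some (pvKeep (pvMatch data depth r i) (depth + (i : Int)))) ∧
  (pvMatch data depth r k).length = 1

theorem pvCert_step (data : List String) (depth : Int) (r : String) (k : Nat)
    (h : pvCert data depth r (k + 1)) :
    pvCert (data.filter (fun s => PySem.Str.pyGet? s depth == PySem.Str.pyGet? r depth)) (depth + 1) r k := by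
  obtain ⟨hi, hfin⟩ := h
  constructor
  · intro i hik
    rw [pvMatch_shift]
    have := hi (i + 1) (by omega)
    have harith : depth + ((i + 1 : Nat) : Int) = (depth + 1) + (i : Int) := by push_cast; ring
    rw [harith] at this
    exact this
  · rw [pvMatch_shift]; exact hfin

theorem pv_chosen_eq_zeros (data : List String) (depth : Int) (r : String)
    (hbit : PySem.Str.pyGet? r depth = some '0') :
    data.filter (fun s => PySem.Str.pyGet? s depth == some '0')
      = data.filter (fun s => PySem.Str.pyGet? s depth == PySem.Str.pyGet? r depth) := by
  apply List.filter_congr; intro s _; rw [hbit]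

theorem pv_chosen_eq_ones (data : List String) (depth : Int) (r : String)
    (hbit : PySem.Str.pyGet? r depth = some '1') :
    data.filter (fun s => PySem.Str.pyGet? s depth == some '1')
      = data.filter (fun s => PySem.Str.pyGet? s depth == PySem.Str.pyGet? r depth) := by
  apply List.filter_congr; intro s _; rw [hbit]

theorem pv_run_A (k : Nat) : ∀ (data : List String) (depth : Int) (r : String),
    r ∈ data → pvCert data depth r k → scrubber data depth = r := by
  induction k with
  | zero =>
    intro data depth r hr ⟨_, hfin⟩
    rw [pvMatch_zero] at hfin
    obtain ⟨s, rfl⟩ := List.length_eq_one_iff.mp hfin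
    simp only [List.mem_singleton] at hr
    rw [hr, scrubber]
  | succ k ih =>
    intro data depth r hr hc
    have h0 := hc.1 0 (by omega)
    rw [pvMatch_zero] at h0
    obtain ⟨hlen2, _, hbit⟩ := h0
    simp only [Nat.cast_zero, add_zero] at hbit
    match data, hlen2 with
    | a :: b :: rest, _ =>
      have hstep := pvCert_step _ depth r k hc
      have hmem := pv_mem_match_one (a :: b :: rest) depth r hr
      have hrec := ih _ (depth + 1) r hmem hstep
      rw [scrubber]
      simp only [pvKeep, List.countP_eq_length_filter] at hbit
      split_ifs at hbit with hzo
      · -- kept bit '0': zeros ≤ ones (as filters), A takes a zeros branch either way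
        rw [pv_chosen_eq_zeros (a :: b :: rest) depth r hbit] at hzo ⊢
        split_ifs with h1 h2
        · exact hrec
        · exact hrec
        · exfalso; omega
      · -- kept bit '1': ones < zeros, A takes the ones branch
        rw [pv_chosen_eq_ones (a :: b :: rest) depth r hbit] at hzo ⊢
        split_ifs with h1 h2
        · exfalso; omega
        · exfalso; omega
        · exact hrec

theorem pv_run_B (k : Nat) : ∀ (fuel : Nat) (data : List String) (depth : Int) (r : String),
    r ∈ data → k < fuel → pvCert data depth r k → pvLoop fuel data depth = r := by
  induction k with
  | zero =>
    intro fuel data depth r hr hf ⟨_, hfin⟩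
    rw [pvMatch_zero] at hfin
    obtain ⟨s, rfl⟩ := List.length_eq_one_iff.mp hfin
    simp only [List.mem_singleton] at hr
    match fuel, hf with
    | f + 1, _ => simp [pvLoop, hr]
  | succ k ih =>
    intro fuel data depth r hr hf hc
    have h0 := hc.1 0 (by omega)
    rw [pvMatch_zero] at h0
    obtain ⟨hlen2, _, hbit⟩ := h0
    match fuel, hf with
    | f + 1, hf =>
      rw [pvLoop]
      have hne : (data.length == 1) = false := by simp; omega
      rw [hne]
      simp only [Bool.false_eq_true, if_false, pvSplit_eq]
      have hstep := pvCert_step data depth r k hc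
      have hmem := pv_mem_match_one data depth r hr
      simp only [Nat.cast_zero, add_zero] at hbit
      simp only [pvKeep, List.countP_eq_length_filter] at hbit
      split_ifs at hbit with hzo
      · -- kept bit '0': not (ones < zeros), B keeps zeros
        rw [if_neg (by omega : ¬ ((data.filter (fun s => PySem.Str.pyGet? s depth == some '1')).length < (data.filter (fun s => PySem.Str.pyGet? s depth == some '0')).length))]
        rw [pv_chosen_eq_zeros data depth r hbit]
        exact ih f _ (depth + 1) r hmem (by omega) hstep
      · -- kept bit '1': ones < zeros, B keeps ones
        rw [if_pos (by omega : (data.filter (fun s => PySem.Str.pyGet? s depth == some '1')).length < (data.filter (fun s => PySem.Str.pyGet? s depth == some '0')).length)]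
        rw [pv_chosen_eq_ones data depth r hbit]
        exact ih f _ (depth + 1) r hmem (by omega) hstep

-- ===== VERDICT (by name: the statement is the Claim_ definition above) =====
theorem scrubber_spec : Claim_equal_scrubber := by
  intro data depth _ hpre
  unfold Spec_scrubber
  rcases hpre with hlen | ⟨r, hr, k, hk, hcert⟩
  · obtain ⟨s, rfl⟩ := List.length_eq_one_iff.mp hlen
    rw [scrubber]
    show s = pvLoop 1 [s] depth
    simp [pvLoop]
  · have hA := pv_run_A k data depth r hr ⟨hcert.1, hcert.2⟩
    have hB := pv_run_B k data.length data depth r hr hk ⟨hcert.1, hcert.2⟩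
    rw [hA]
    unfold scrubber_alt
    rw [hB]
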